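-- pv_equiv track=rewrite | github.com/Clara-Ye/15-112 | hw3.py | getPrevNumber
-- ===== SOURCE A (Python) =====
-- def getPrevNumber(expr, operaterIndex):
--     prevIndex = operaterIndex - 1
--     numStr = ""
--     # get all the numbers before hitting another operater:
--     while (prevIndex > -1) and (expr[prevIndex].isdigit()):
--         numStr = expr[prevIndex] + numStr
--         prevIndex -= 1
--     prev = expr[:prevIndex+1]
--     num = int(numStr)
--     return (prev, num)
-- ===== SOURCE B (Python) =====
-- def getPrevNumber(expr, operaterIndex):
--     left = expr[:operaterIndex]
--     prev = left.rstrip("0123456789")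
--     return (prev, int(left[len(prev):]))
-- ===== Notes on version B (the rewrite author's own statement) =====
-- stated objective: idiomatic
-- what changed: Replaces the explicit backward char-by-char scan with incremental string prepending by slicing off the left part and stripping its trailing digit run with str.rstrip('0123456789'), parsing the removed run with one int() call.
import Mathlib
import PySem

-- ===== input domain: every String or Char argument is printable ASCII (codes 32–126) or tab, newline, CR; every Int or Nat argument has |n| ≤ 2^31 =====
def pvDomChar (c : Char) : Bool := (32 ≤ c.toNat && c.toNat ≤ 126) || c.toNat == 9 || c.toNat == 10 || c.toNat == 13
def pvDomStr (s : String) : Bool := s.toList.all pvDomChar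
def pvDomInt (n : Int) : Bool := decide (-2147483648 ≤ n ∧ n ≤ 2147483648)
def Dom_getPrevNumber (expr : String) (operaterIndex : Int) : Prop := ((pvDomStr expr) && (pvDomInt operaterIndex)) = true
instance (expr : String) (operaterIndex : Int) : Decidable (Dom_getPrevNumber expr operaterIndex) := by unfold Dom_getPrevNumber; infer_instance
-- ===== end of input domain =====

-- B replaces A's backward char-by-char scan (with incremental string prepend) by slicing off
-- expr[:operaterIndex] and stripping its trailing digit run with rstrip, then one int() parse
-- of the removed run: same values on Pre_, a more idiomatic decomposition.


-- ===== PORT A =====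
-- the while loop: state (prevIndex, numStr); fuel bounds the iteration count (the loop
-- decrements prevIndex from operaterIndex-1 down to at most -1, so operaterIndex.toNat
-- iterations suffice); Python's numStr is the List Char accumulator (prepend = 'c + numStr')
def getPrevNumberLoop (expr : String) : Nat → Int → List Char → Int × List Char
  | 0, prevIndex, numStr => (prevIndex, numStr)
  | fuel + 1, prevIndex, numStr =>
    if prevIndex > -1 then
      match PySem.Str.pyGet? expr prevIndex with
      | some c =>
        if PySem.Chars.isdigit c then
          getPrevNumberLoop expr fuel (prevIndex - 1) (c :: numStr)
        else (prevIndex, numStr)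
      | none => (prevIndex, numStr)   -- IndexError in Python; excluded by Pre_
    else (prevIndex, numStr)

def getPrevNumber (expr : String) (operaterIndex : Int) : String × Int :=
  let r := getPrevNumberLoop expr operaterIndex.toNat (operaterIndex - 1) []
  let prev := PySem.Str.slice expr none (some (r.1 + 1))        -- expr[:prevIndex+1]
  let num := (PySem.Int.ofChars? r.2).getD 0                     -- int(numStr); none = ValueError, excluded by Pre_
  (prev, num)

-- ===== PORT B =====
-- exact port of str.rstrip("0123456789"): drop the trailing run of chars from that set
def pvRStripDigits (cs : List Char) : List Char :=
  (cs.reverse.dropWhile (fun c => ("0123456789".toList).contains c)).reverse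

def getPrevNumber_alt (expr : String) (operaterIndex : Int) : String × Int :=
  let left := PySem.List.slice expr.toList none (some operaterIndex)   -- expr[:operaterIndex]
  let prev := pvRStripDigits left                                       -- left.rstrip("0123456789")
  let num := (PySem.Int.ofChars? (left.drop prev.length)).getD 0        -- int(left[len(prev):]); none = ValueError, excluded by Pre_
  (String.ofList prev, num)

-- ===== PRECONDITION & SPEC =====
-- exactly the inputs on which Python A returns: the index is in [1, len(expr)] (else the
-- backward scan hits IndexError past the end) and the char just before it is a digit (else
-- numStr is empty and int('') raises ValueError)
def Pre_getPrevNumber (expr : String) (operaterIndex : Int) : Prop :=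
  1 ≤ operaterIndex ∧ operaterIndex ≤ expr.toList.length ∧
  (expr.toList[(operaterIndex - 1).toNat]?.any PySem.Chars.isdigit) = true
instance (expr : String) (operaterIndex : Int) : Decidable (Pre_getPrevNumber expr operaterIndex) := by unfold Pre_getPrevNumber; infer_instance

def pvWitness_getPrevNumber : String × Int := ("12+34", 2)

def Spec_getPrevNumber (expr : String) (operaterIndex : Int) (out : String × Int) : Prop := out = getPrevNumber_alt expr operaterIndex
instance (expr : String) (operaterIndex : Int) (out : String × Int) : Decidable (Spec_getPrevNumber expr operaterIndex out) := by unfold Spec_getPrevNumber; infer_instance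

-- ===== CLAIM (what is proved, stated in full; the proofs are below) =====
def Claim_equal_getPrevNumber : Prop := ∀ (expr : String) (operaterIndex : Int), Dom_getPrevNumber expr operaterIndex → Pre_getPrevNumber expr operaterIndex → Spec_getPrevNumber expr operaterIndex (getPrevNumber expr operaterIndex)

-- ===== LEMMAS AND PROOFS =====

theorem contains_digits (c : Char) :
    ("0123456789".toList).contains c = PySem.Chars.isdigit c := by
  rw [show "0123456789".toList = ['0','1','2','3','4','5','6','7','8','9'] from rfl]
  by_cases h : PySem.Chars.isdigit c = true
  · rw [h]
    simp only [PySem.Chars.isdigit, Bool.and_eq_true, decide_eq_true_eq] at h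
    obtain ⟨h1, h2⟩ := h
    have h1' : 48 ≤ c.toNat := h1
    have h2' : c.toNat ≤ 57 := h2
    rw [← Char.ofNat_toNat c]
    interval_cases hn : c.toNat <;> decide
  · rw [Bool.eq_false_iff.mpr h]
    simp only [PySem.Chars.isdigit, Bool.and_eq_true, decide_eq_true_eq, not_and, not_le] at h
    simp only [List.contains_eq_mem, decide_eq_false_iff_not, List.mem_cons, List.not_mem_nil, or_false]
    rintro (rfl|rfl|rfl|rfl|rfl|rfl|rfl|rfl|rfl|rfl) <;> simp_all

-- loop characterization: starting with fuel k and index k-1, the scan splits the reversed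
-- k-prefix at its leading digit run
theorem getPrevNumberLoop_eq (expr : String) :
    ∀ (k : Nat), k ≤ expr.toList.length → ∀ (acc : List Char),
      getPrevNumberLoop expr k ((k : Int) - 1) acc
        = ((((expr.toList.take k).reverse.dropWhile PySem.Chars.isdigit).length : Int) - 1,
           ((expr.toList.take k).reverse.takeWhile PySem.Chars.isdigit).reverse ++ acc) := by
  intro k
  induction k with
  | zero => intro _ acc; simp [getPrevNumberLoop]
  | succ k ih =>
    intro hk acc
    have hklt : k < expr.toList.length := by omega
    have hcond : ((k : Int) + 1 - 1 > -1) := by omega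
    have hidx : PySem.Str.pyGet? expr ((k : Int) + 1 - 1) = some (expr.toList[k]) := by
      have : ((k : Int) + 1 - 1) = ((k : Nat) : Int) := by omega
      rw [this, PySem.Str.pyGet?_natCast]
      exact List.getElem?_eq_getElem hklt
    have htake : expr.toList.take (k + 1) = expr.toList.take k ++ [expr.toList[k]] := by
      rw [List.take_add_one, List.getElem?_eq_getElem hklt]
      rfl
    show getPrevNumberLoop expr (k + 1) (((k : Nat) + 1 : Int) - 1) acc = _
    rw [getPrevNumberLoop]
    rw [if_pos hcond]
    simp only [hidx]
    by_cases hd : PySem.Chars.isdigit (expr.toList[k]) = true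
    · rw [if_pos hd]
      have heq : ((k : Nat) + 1 : Int) - 1 - 1 = ((k : Nat) : Int) - 1 := by omega
      rw [heq, ih (by omega), htake]
      simp only [List.reverse_append, List.reverse_cons, List.reverse_nil, List.nil_append,
        List.singleton_append, List.dropWhile_cons, List.takeWhile_cons, hd, ite_true,
        Prod.mk.injEq, List.reverse_nil]
      simp
    · rw [if_neg hd, htake]
      have hlen : (expr.toList.take k).length = k := by
        rw [List.length_take]; omega
      simp only [List.reverse_append, List.reverse_cons, List.reverse_nil, List.nil_append,
        List.singleton_append, List.dropWhile_cons, List.takeWhile_cons, hd, ite_false,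
        Prod.mk.injEq, Bool.false_eq_true]
      constructor
      · simp [hlen]
      · simp

theorem getPrevNumber_spec : Claim_equal_getPrevNumber := by
  intro expr operaterIndex _hdom hpre
  obtain ⟨h1, h2, _hdig⟩ := hpre
  unfold Spec_getPrevNumber
  set l := expr.toList with hl
  -- name the index as a Nat
  obtain ⟨n, rfl⟩ : ∃ n : Nat, operaterIndex = (n : Int) :=
    ⟨operaterIndex.toNat, (Int.toNat_of_nonneg (by omega)).symm⟩
  have hn1 : 1 ≤ n := by exact_mod_cast h1
  have hn2 : n ≤ l.length := by exact_mod_cast h2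
  -- decompose the reversed n-prefix at its leading digit run
  set P := (l.take n).reverse with hP
  set ds := P.takeWhile PySem.Chars.isdigit with hds
  set rest := P.dropWhile PySem.Chars.isdigit with hrest
  have hsplit : ds ++ rest = P := List.takeWhile_append_dropWhile
  have hPlen : P.length = n := by
    simp [hP, List.length_take, Nat.min_eq_left hn2]
  have hrlen : rest.length ≤ n := by
    have := congrArg List.length hsplit
    simp at this; omega
  have htakeP : l.take n = rest.reverse ++ ds.reverse := by
    have := congrArg List.reverse hsplit
    simpa [hP] using this.symm
  have hloop := getPrevNumberLoop_eq expr n hn2 []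
  have hstrip : pvRStripDigits (l.take n) = rest.reverse := by
    unfold pvRStripDigits
    rw [show (fun c => ("0123456789".toList).contains c) = PySem.Chars.isdigit from funext contains_digits]
  simp only [getPrevNumber, getPrevNumber_alt]
  rw [show ((n : Int)).toNat = n from Int.toNat_natCast n, hloop,
      PySem.List.slice_to _ (by omega : (0:Int) ≤ (n : Int)),
      show ((n : Int)).toNat = n from Int.toNat_natCast n, ← hl, hstrip]
  dsimp only
  simp only [← hP, ← hds, ← hrest, List.append_nil]
  -- the two components
  rw [Prod.mk.injEq]
  constructor
  · -- prev: expr[:rest.length] = rest.reverse as a String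
    have heq : ((rest.length : Int) - 1 + 1) = ((rest.length : Nat) : Int) := by omega
    rw [heq]
    have htak : l.take rest.length = rest.reverse := by
      have h' : l.take rest.length = (l.take n).take rest.length := by
        rw [List.take_take, Nat.min_eq_left hrlen]
      rw [h', htakeP, List.take_left' (by simp)]
    have hslice : (PySem.Str.slice expr none (some ((rest.length : Nat) : Int))).toList
        = (String.ofList rest.reverse).toList := by
      rw [PySem.Str.toList_slice, PySem.Chars.slice_eq_listSlice, ← hl,
          PySem.List.slice_to _ (by omega), Int.toNat_natCast, htak]
      simp
    exact String.toList_injective hslice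
  · -- num: the same digit run is parsed on both sides
    have hdrop : (l.take n).drop rest.reverse.length = ds.reverse := by
      rw [htakeP, List.drop_left]
    rw [hdrop]
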